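-- pv_equiv track=rewrite | github.com/thu-coai/CrossWOZ | convlab2/policy/vhus/camrest/usermanager.py | usrseq2da
-- ===== SOURCE A (Python) =====
-- informable_keys = ['address', 'area', 'food', 'name', 'phone', 'pricerange']
--
-- def usrseq2da(usr_seq: list, goal: dict):
--     ret = {}
--     cur_act = None
--     for word in usr_seq:
--         if word in ['<PAD>', '<UNK>', '<SOS>', '<EOS>', '(', ')']:
--             continue
--
--         # act
--         if '-' in word:
--             cur_act = word
--             ret[cur_act] = []
--
--         # slot-value
--         elif '=' in word and cur_act is not None:
--             slot_da, value_pos = word.split('=')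
--             value_pos = value_pos.lower()
--             slot_goal = slot_da if slot_da in informable_keys else None
--             if slot_goal is not None:
--                 value = None
--                 if value_pos == 'ininfo':
--                     value = goal.get('info', {}).get(slot_goal, None)
--                 elif value_pos == 'donotcare':
--                     value = 'dontcare'
--
--                 if value is not None:
--                     ret[cur_act].append([slot_da, value])
--                 else:
--                     pass
--                     #assert False, slot_da
--             else:
--                 pass
--                 # assert False, '%s - %s' % (domain, slot_da)
--
--         # slot in reqt
--         elif cur_act is not None:
--             ret[cur_act].append([word, '?'])
--
--     return ret
-- ===== SOURCE B (Python) =====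
-- informable_keys = ['address', 'area', 'food', 'name', 'phone', 'pricerange']
--
-- _SPECIAL = ('<PAD>', '<UNK>', '<SOS>', '<EOS>', '(', ')')
--
--
-- def _segments(usr_seq):
--     """Group the token stream into (act, tokens) segments; tokens before the
--     first act token are discarded."""
--     done, cur = [], None
--     for w in usr_seq:
--         if w in _SPECIAL:
--             continue
--         if '-' in w:
--             if cur is not None:
--                 done.append(cur)
--             cur = (w, [])
--         elif cur is not None:
--             cur[1].append(w)
--     if cur is not None:
--         done.append(cur)
--     return done
--
--
-- def _classify(w, goal):
--     """Turn one non-act token into a [slot, value] pair, or None to drop it."""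
--     if '=' not in w:
--         return [w, '?']
--     slot, vp = w.split('=')
--     if slot not in informable_keys:
--         return None
--     vp = vp.lower()
--     if vp == 'ininfo':
--         v = goal.get('info', {}).get(slot)
--         return None if v is None else [slot, v]
--     if vp == 'donotcare':
--         return [slot, 'dontcare']
--     return None
--
--
-- def usrseq2da(usr_seq: list, goal: dict):
--     ret = {}
--     for act, toks in _segments(usr_seq):
--         ret[act] = [p for p in (_classify(t, goal) for t in toks) if p is not None]
--     return ret
-- ===== Notes on version B (the rewrite author's own statement) =====
-- stated objective: alternative
-- what changed: Replaces A's single stateful scan mutating a dict per token by a two-phase decomposition: first group the token stream into (act, tokens) segments, then classify each segment's tokens with a pure per-token function and assign each segment's finished value list into the dict.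
import Mathlib
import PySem

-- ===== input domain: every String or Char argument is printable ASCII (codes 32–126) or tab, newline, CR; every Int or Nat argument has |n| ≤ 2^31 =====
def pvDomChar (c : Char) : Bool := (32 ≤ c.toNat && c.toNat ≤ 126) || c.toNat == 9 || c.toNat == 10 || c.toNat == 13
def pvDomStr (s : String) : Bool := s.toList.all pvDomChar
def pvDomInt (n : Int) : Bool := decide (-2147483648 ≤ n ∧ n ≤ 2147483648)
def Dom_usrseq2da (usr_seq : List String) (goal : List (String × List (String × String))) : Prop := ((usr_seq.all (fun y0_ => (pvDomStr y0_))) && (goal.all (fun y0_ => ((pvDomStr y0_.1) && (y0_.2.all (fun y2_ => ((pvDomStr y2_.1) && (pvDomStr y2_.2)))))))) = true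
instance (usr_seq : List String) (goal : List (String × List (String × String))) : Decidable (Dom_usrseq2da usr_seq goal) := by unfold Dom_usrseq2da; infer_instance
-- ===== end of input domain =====

-- ===== PORT A =====
-- B restructures A's single stateful scan into segment-grouping + pure per-token classification (alternative decomposition, same cost).
-- The equivalence is about the RETURN value (neither program mutates its arguments).

-- special tokens skipped by the scan ('word in [...]')
def pvSpecialTok (w : String) : Bool := ["<PAD>", "<UNK>", "<SOS>", "<EOS>", "(", ")"].contains w

def pvInformableKeys : List String := ["address", "area", "food", "name", "phone", "pricerange"]

-- goal.get('info', {}).get(slot, None)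
def pvGoalInfo (goal : List (String × List (String × String))) (slot : String) : Option String :=
  (PySem.Dict.ofList ((PySem.Dict.ofList goal).getD "info" [])).get? slot

-- one iteration of A's for-loop; state = (ret, cur_act)
def usrseq2daStep (goal : List (String × List (String × String)))
    (st : PySem.Dict String (List (List String)) × Option String) (word : String) :
    PySem.Dict String (List (List String)) × Option String :=
  if pvSpecialTok word then st
  else if PySem.Str.isIn "-" word then (st.1.insert word [], some word)
  else match st.2 with
  | none => st                        -- both remaining branches require cur_act is not None
  | some act =>
    if PySem.Str.isIn "=" word then
      match PySem.Str.split? word "=" with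
      | some [slot_da, value_pos] =>
        if pvInformableKeys.contains slot_da then
          let value_pos := PySem.Str.lower value_pos
          let value : Option String :=
            if value_pos = "ininfo" then pvGoalInfo goal slot_da
            else if value_pos = "donotcare" then some "dontcare"
            else none
          match value with
          | some v => (st.1.modify act [] (fun l => l ++ [[slot_da, v]]), st.2)
          | none => st
        else st
      | _ => st                       -- Python raises ValueError (unpacking != 2 parts); excluded by Pre_
    else (st.1.modify act [] (fun l => l ++ [[word, "?"]]), st.2)

def usrseq2da (usr_seq : List String) (goal : List (String × List (String × String))) : List (String × List (List String)) :=
  (usr_seq.foldl (usrseq2daStep goal) (PySem.Dict.empty, none)).1.items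

-- ===== PORT B =====
-- phase 1: one iteration of _segments' loop; state = (done, cur)
def pvSegStep (st : List (String × List String) × Option (String × List String)) (w : String) :
    List (String × List String) × Option (String × List String) :=
  if pvSpecialTok w then st
  else if PySem.Str.isIn "-" w then
    ((match st.2 with | some c => st.1 ++ [c] | none => st.1), some (w, []))
  else match st.2 with
  | some c => (st.1, some (c.1, c.2 ++ [w]))
  | none => st

def pvSegments (usr_seq : List String) : List (String × List String) :=
  let st := usr_seq.foldl pvSegStep ([], none)
  match st.2 with | some c => st.1 ++ [c] | none => st.1

-- phase 2: _classify(w, goal)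
def pvClassify (goal : List (String × List (String × String))) (w : String) : Option (List String) :=
  if PySem.Str.isIn "=" w = false then some [w, "?"]
  else match PySem.Str.split? w "=" with
  | some [slot, vp] =>
    if pvInformableKeys.contains slot = false then none
    else
      let vp := PySem.Str.lower vp
      if vp = "ininfo" then
        match pvGoalInfo goal slot with
        | none => none
        | some v => some [slot, v]
      else if vp = "donotcare" then some [slot, "dontcare"]
      else none
  | _ => none                         -- Python raises ValueError (unpacking != 2 parts); excluded by Pre_

def usrseq2da_alt (usr_seq : List String) (goal : List (String × List (String × String))) : List (String × List (List String)) :=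
  ((pvSegments usr_seq).foldl
    (fun ret seg => ret.insert seg.1 (seg.2.filterMap (pvClassify goal)))
    PySem.Dict.empty).items

-- ===== PRECONDITION & SPEC =====
-- a token on which 'slot_da, value_pos = word.split('=')' raises ValueError (it has more than one '=')
def pvBadTok (w : String) : Bool :=
  !pvSpecialTok w && !PySem.Str.isIn "-" w && PySem.Str.isIn "=" w &&
    !((PySem.Str.split? w "=").map List.length == some 2)

-- Pre_ excludes exactly the sequences on which both programs raise ValueError: a non-special token with more
-- than one '=' (and no '-') occurring at or after the first '-' token (i.e. once cur_act is set).
def Pre_usrseq2da (usr_seq : List String) (goal : List (String × List (String × String))) : Prop :=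
  ((usr_seq.dropWhile (fun w => !PySem.Str.isIn "-" w)).all (fun w => !pvBadTok w)) = true

instance (usr_seq : List String) (goal : List (String × List (String × String))) : Decidable (Pre_usrseq2da usr_seq goal) := by unfold Pre_usrseq2da; infer_instance

def pvWitness_usrseq2da : List String × (List (String × List (String × String))) :=
  (["<SOS>", "hello", "inform-restaurant", "food=ininfo", "area=donotcare", "name", "request-y", "phone", "<EOS>"],
   [("info", [("food", "pizza"), ("area", "north")])])

def Spec_usrseq2da (usr_seq : List String) (goal : List (String × List (String × String))) (out : List (String × List (List String))) : Prop := out = usrseq2da_alt usr_seq goal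
instance (usr_seq : List String) (goal : List (String × List (String × String))) (out : List (String × List (List String))) : Decidable (Spec_usrseq2da usr_seq goal out) := by unfold Spec_usrseq2da; infer_instance

-- ===== CLAIM (what is proved, stated in full; the proofs are below) =====
def Claim_equal_usrseq2da : Prop := ∀ (usr_seq : List String) (goal : List (String × List (String × String))), Dom_usrseq2da usr_seq goal → Pre_usrseq2da usr_seq goal → Spec_usrseq2da usr_seq goal (usrseq2da usr_seq goal)

-- ===== LEMMAS AND PROOFS =====

-- the dict B builds from a list of segments
def pvDictOf (goal : List (String × List (String × String))) (segs : List (String × List String)) :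
    PySem.Dict String (List (List String)) :=
  segs.foldl (fun ret seg => ret.insert seg.1 (seg.2.filterMap (pvClassify goal))) PySem.Dict.empty

-- B's phase-1 state, viewed as A's state
def pvAbs (goal : List (String × List (String × String)))
    (st : List (String × List String) × Option (String × List String)) :
    PySem.Dict String (List (List String)) × Option String :=
  (pvDictOf goal (st.1 ++ st.2.toList), st.2.map (·.1))

-- the tokens still allowed, given whether an act is open
def pvOk (cur : Option (String × List String)) (l : List String) : Bool :=
  match cur with
  | none => (l.dropWhile (fun w => !PySem.Str.isIn "-" w)).all (fun w => !pvBadTok w)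
  | some _ => l.all (fun w => !pvBadTok w)

theorem pvDictOf_append_singleton (goal : List (String × List (String × String)))
    (segs : List (String × List String)) (s : String × List String) :
    pvDictOf goal (segs ++ [s]) = (pvDictOf goal segs).insert s.1 (s.2.filterMap (pvClassify goal)) := by
  simp [pvDictOf, List.foldl_append]

theorem pvModify_insert_self (d : PySem.Dict String (List (List String)))
    (k : String) (v : List (List String)) (f : List (List String) → List (List String)) :
    (d.insert k v).modify k [] f = d.insert k (f v) := by
  simp [PySem.Dict.modify, PySem.Dict.getD_insert_self, PySem.Dict.insert_insert_self]

-- one non-special, non-act, non-bad token: A's branch is exactly "append pvClassify's result, if any"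
theorem pvStep_eq_classify (goal : List (String × List (String × String)))
    (d : PySem.Dict String (List (List String))) (a : String) (v : List (List String)) (w : String)
    (hs : pvSpecialTok w = false) (hd : PySem.Str.isIn "-" w = false) (hb : pvBadTok w = false) :
    usrseq2daStep goal (d.insert a v, some a) w =
      (match pvClassify goal w with
       | some p => (d.insert a (v ++ [p]), some a)
       | none => (d.insert a v, some a)) := by
  have hdc : PySem.Chars.isIn ['-'] w.toList = false := by simpa using hd
  by_cases he : PySem.Str.isIn "=" w = true
  · have hec : PySem.Chars.isIn ['='] w.toList = true := by simpa using he
    have h2 : ((PySem.Str.split? w "=").map List.length == some 2) = true := by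
      simp only [pvBadTok, hs, hd, he] at hb; simpa using hb
    obtain ⟨parts, hp⟩ : ∃ parts, PySem.Str.split? w "=" = some parts := by
      cases hq : PySem.Str.split? w "=" with
      | none => rw [hq] at h2; simp at h2
      | some parts => exact ⟨parts, rfl⟩
    rw [hp] at h2
    obtain ⟨slot, vp, hpv⟩ : ∃ slot vp, parts = [slot, vp] := by
      match parts, h2 with
      | [slot, vp], _ => exact ⟨slot, vp, rfl⟩
    subst hpv
    by_cases hik : pvInformableKeys.contains slot = true
    · have hikm : slot ∈ pvInformableKeys := by simpa using hik
      by_cases hin : PySem.Str.lower vp = "ininfo"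
      · cases hg : pvGoalInfo goal slot with
        | none => simp [usrseq2daStep, pvClassify, hs, hdc, hec, hp, hikm, hin, hg]
        | some val => simp [usrseq2daStep, pvClassify, hs, hdc, hec, hp, hikm, hin, hg, pvModify_insert_self]
      · by_cases hdnc : PySem.Str.lower vp = "donotcare"
        · simp [usrseq2daStep, pvClassify, hs, hdc, hec, hp, hikm, hdnc, pvModify_insert_self]
        · simp [usrseq2daStep, pvClassify, hs, hdc, hec, hp, hikm, hin, hdnc]
    · have hikm : slot ∉ pvInformableKeys := by simpa using hik
      simp [usrseq2daStep, pvClassify, hs, hdc, hec, hp, hikm]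
  · simp only [Bool.not_eq_true] at he
    have hec : PySem.Chars.isIn ['='] w.toList = false := by simpa using he
    simp [usrseq2daStep, pvClassify, hs, hdc, hec, pvModify_insert_self]

-- lifted to pvAbs: the token lands in the open segment
theorem pvStep_token (goal : List (String × List (String × String)))
    (done : List (String × List String)) (a : String) (ts : List String) (w : String)
    (hs : pvSpecialTok w = false) (hd : PySem.Str.isIn "-" w = false) (hb : pvBadTok w = false) :
    usrseq2daStep goal (pvAbs goal (done, some (a, ts))) w = pvAbs goal (done, some (a, ts ++ [w])) := by
  have habs : pvAbs goal (done, some (a, ts)) =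
      ((pvDictOf goal done).insert a (ts.filterMap (pvClassify goal)), some a) := by
    simp [pvAbs, pvDictOf_append_singleton]
  have habs' : pvAbs goal (done, some (a, ts ++ [w])) =
      ((pvDictOf goal done).insert a ((ts ++ [w]).filterMap (pvClassify goal)), some a) := by
    simp [pvAbs, pvDictOf_append_singleton]
  rw [habs, habs', List.filterMap_append,
    pvStep_eq_classify goal (pvDictOf goal done) a (ts.filterMap (pvClassify goal)) w hs hd hb]
  cases hcw : pvClassify goal w <;> simp [hcw]

-- main invariant: A's fold over the remaining tokens tracks B's phase-1 fold through pvAbs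
theorem pvMain (goal : List (String × List (String × String))) (l : List String) :
    ∀ st : List (String × List String) × Option (String × List String),
      pvOk st.2 l = true →
      l.foldl (usrseq2daStep goal) (pvAbs goal st) = pvAbs goal (l.foldl pvSegStep st) := by
  induction l with
  | nil => intro st _; rfl
  | cons w l ih =>
    intro ⟨done, cur⟩ hok
    by_cases hs : pvSpecialTok w = true
    · -- both scans skip a special token; special tokens contain no '-', so pvOk carries over unchanged
      have hstep : usrseq2daStep goal (pvAbs goal (done, cur)) w = pvAbs goal (done, cur) := by
        simp [usrseq2daStep, hs]
      have hseg : pvSegStep (done, cur) w = (done, cur) := by simp [pvSegStep, hs]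
      have hdC : PySem.Chars.isIn ['-'] w.toList = false := by
        have : w ∈ ["<PAD>", "<UNK>", "<SOS>", "<EOS>", "(", ")"] := by
          simpa [pvSpecialTok] using hs
        fin_cases this <;> decide
      have hok' : pvOk cur l = true := by
        cases cur with
        | none => simpa [pvOk, List.dropWhile_cons, hdC] using hok
        | some c =>
          have h : ((w :: l).all fun x => !pvBadTok x) = true := by simpa [pvOk] using hok
          simp only [List.all_cons, Bool.and_eq_true] at h
          simpa [pvOk] using h.2
      simp only [List.foldl_cons, hstep, hseg]
      exact ih (done, cur) hok'
    · have hs' : pvSpecialTok w = false := by simpa using hs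
      by_cases hd : PySem.Str.isIn "-" w = true
      · -- act token: close the open segment, open a new one
        have hdC : PySem.Chars.isIn ['-'] w.toList = true := by simpa using hd
        have hstep : usrseq2daStep goal (pvAbs goal (done, cur)) w =
            pvAbs goal (done ++ cur.toList, some (w, [])) := by
          simp [usrseq2daStep, hs', hdC, pvAbs, -List.append_assoc, pvDictOf_append_singleton]
        have hseg : pvSegStep (done, cur) w = (done ++ cur.toList, some (w, [])) := by
          cases cur <;> simp [pvSegStep, hs', hdC]
        have hok' : pvOk (some (w, ([] : List String))) l = true := by
          cases cur with
          | none =>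
            have h : ((w :: l).all fun x => !pvBadTok x) = true := by
              simpa [pvOk, List.dropWhile_cons, hdC] using hok
            simp only [List.all_cons, Bool.and_eq_true] at h
            simpa [pvOk] using h.2
          | some c =>
            have h : ((w :: l).all fun x => !pvBadTok x) = true := by simpa [pvOk] using hok
            simp only [List.all_cons, Bool.and_eq_true] at h
            simpa [pvOk] using h.2
        simp only [List.foldl_cons, hstep, hseg]
        exact ih (done ++ cur.toList, some (w, [])) hok'
      · have hd' : PySem.Str.isIn "-" w = false := by simpa using hd
        have hdC : PySem.Chars.isIn ['-'] w.toList = false := by simpa using hd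
        cases cur with
        | none =>
          -- no act yet: both scans drop the token
          have hstep : usrseq2daStep goal (pvAbs goal (done, none)) w = pvAbs goal (done, none) := by
            simp [usrseq2daStep, hs', hdC, pvAbs]
          have hseg : pvSegStep (done, none) w = (done, none) := by simp [pvSegStep, hs', hdC]
          have hok' : pvOk (none : Option (String × List String)) l = true := by
            simpa [pvOk, List.dropWhile_cons, hdC] using hok
          simp only [List.foldl_cons, hstep, hseg]
          exact ih (done, none) hok'
        | some c =>
          obtain ⟨a, ts⟩ := c
          have hall : ((w :: l).all fun x => !pvBadTok x) = true := by simpa [pvOk] using hok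
          simp only [List.all_cons, Bool.and_eq_true] at hall
          have hbw : pvBadTok w = false := by simpa using hall.1
          have hseg : pvSegStep (done, some (a, ts)) w = (done, some (a, ts ++ [w])) := by
            simp [pvSegStep, hs', hdC]
          have hok' : pvOk (some (a, ts ++ [w])) l = true := by simpa [pvOk] using hall.2
          simp only [List.foldl_cons, hseg,
            pvStep_token goal done a ts w hs' hd' hbw]
          exact ih (done, some (a, ts ++ [w])) hok'

-- ===== VERDICT (by name: the statement is the Claim_ definition above) =====
theorem usrseq2da_spec : Claim_equal_usrseq2da := by
  intro usr_seq goal _ hpre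
  show usrseq2da usr_seq goal = usrseq2da_alt usr_seq goal
  have h0 : pvAbs goal (([] : List (String × List String)), (none : Option (String × List String))) =
      (PySem.Dict.empty, none) := rfl
  have hm := pvMain goal usr_seq ([], none) (by simpa [Pre_usrseq2da, pvOk] using hpre)
  rw [h0] at hm
  unfold usrseq2da usrseq2da_alt
  rw [hm]
  unfold pvAbs pvSegments
  cases hcur : (usr_seq.foldl pvSegStep ([], none)).2 <;>
    simp [hcur, pvDictOf, Option.toList]
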